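-- pv_equiv track=rewrite | github.com/Piyush3462/Auto-Reply-AI-ChatBot | Main.py | is_last_message_from_sender
-- ===== SOURCE A (Python) =====
-- def is_last_message_from_sender(chat_log, sender_name="Prit Bhai"):
--     if not chat_log:
--         return False
--
--     lines = chat_log.strip().split("\n")
--
--     # Find last message from sender
--     for line in reversed(lines):
--         if sender_name in line:
--             return True
--         if "!!_piyush_!!" in line:
--             return False
--
--     return False
-- ===== SOURCE B (Python) =====
-- def is_last_message_from_sender(chat_log, sender_name="Prit Bhai"):
--     if not chat_log:
--         return False
--
--     result = False
--     for line in chat_log.strip().split("\n"):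
--         if sender_name in line:
--             result = True
--         elif "!!_piyush_!!" in line:
--             result = False
--     return result
-- ===== Notes on version B (the rewrite author's own statement) =====
-- stated objective: alternative
-- what changed: Replaces the reversed scan with early returns by a single forward pass that maintains a result flag updated at each line (sender match sets it, sentinel match clears it), returning the flag at the end.
import Mathlib
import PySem

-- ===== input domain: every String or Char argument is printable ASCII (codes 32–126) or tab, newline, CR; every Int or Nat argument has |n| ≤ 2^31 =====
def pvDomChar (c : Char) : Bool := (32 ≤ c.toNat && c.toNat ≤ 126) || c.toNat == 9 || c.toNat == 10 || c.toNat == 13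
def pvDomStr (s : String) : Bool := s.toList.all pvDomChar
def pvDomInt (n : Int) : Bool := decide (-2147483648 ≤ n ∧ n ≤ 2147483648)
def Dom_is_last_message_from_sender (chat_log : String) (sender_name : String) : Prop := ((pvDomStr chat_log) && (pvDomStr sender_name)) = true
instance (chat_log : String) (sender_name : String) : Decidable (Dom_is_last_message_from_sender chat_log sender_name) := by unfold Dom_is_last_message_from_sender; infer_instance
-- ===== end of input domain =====

-- ===== PORT A =====
-- B is a structurally different forward single-pass version of A (same result); this file proves A = B on Dom.
-- helper: A's reversed-lines loop with early returns
def pvScanRev (sender_name : String) : List String → Bool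
  | [] => false
  | line :: rest =>
    if PySem.Str.isIn sender_name line then true
    else if PySem.Str.isIn "!!_piyush_!!" line then false
    else pvScanRev sender_name rest

def is_last_message_from_sender (chat_log : String) (sender_name : String) : Bool :=
  if chat_log == "" then false
  else
    let lines := (PySem.Str.split? (PySem.Str.strip chat_log) "\n").getD []
    pvScanRev sender_name lines.reverse

-- ===== PORT B =====
def is_last_message_from_sender_alt (chat_log : String) (sender_name : String) : Bool :=
  if chat_log == "" then false
  else
    ((PySem.Str.split? (PySem.Str.strip chat_log) "\n").getD []).foldl
      (fun result line =>
        if PySem.Str.isIn sender_name line then true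
        else if PySem.Str.isIn "!!_piyush_!!" line then false
        else result)
      false

-- ===== PRECONDITION & SPEC =====
def Spec_is_last_message_from_sender (chat_log : String) (sender_name : String) (out : Bool) : Prop := out = is_last_message_from_sender_alt chat_log sender_name
instance (chat_log : String) (sender_name : String) (out : Bool) : Decidable (Spec_is_last_message_from_sender chat_log sender_name out) := by unfold Spec_is_last_message_from_sender; infer_instance

-- ===== CLAIM (what is proved, stated in full; the proofs are below) =====
def Claim_equal_is_last_message_from_sender : Prop := ∀ (chat_log : String) (sender_name : String), Dom_is_last_message_from_sender chat_log sender_name → Spec_is_last_message_from_sender chat_log sender_name (is_last_message_from_sender chat_log sender_name)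

-- ===== LEMMAS AND PROOFS =====
theorem pvScanRev_eq_foldl (sender_name : String) (ls : List String) :
    ls.foldl
      (fun result line =>
        if PySem.Str.isIn sender_name line then true
        else if PySem.Str.isIn "!!_piyush_!!" line then false
        else result)
      false = pvScanRev sender_name ls.reverse := by
  induction ls using List.reverseRecOn with
  | nil => rfl
  | append_singleton xs x ih =>
    rw [List.foldl_append, List.reverse_append, ih]
    show (if PySem.Str.isIn sender_name x then true
          else if PySem.Str.isIn "!!_piyush_!!" x then false
          else pvScanRev sender_name xs.reverse) = _
    simp only [List.reverse_cons, List.reverse_nil, List.nil_append, List.singleton_append,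
      pvScanRev]

-- ===== VERDICT (by name: the statement is the Claim_ definition above) =====
theorem is_last_message_from_sender_spec : Claim_equal_is_last_message_from_sender := by
  intro chat_log sender_name _
  unfold Spec_is_last_message_from_sender is_last_message_from_sender is_last_message_from_sender_alt
  split_ifs with h
  · rfl
  · exact (pvScanRev_eq_foldl sender_name _).symm
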